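-- pv_equiv track=rewrite | github.com/dodo0517cc/Master-Thesis | ensemble/ensemble_soft.py | hierarchical_model
-- ===== SOURCE A (Python) =====
-- def hierarchical_model(cn, emci, lmci, ad):
--     length = len(cn) + len(emci) + len(lmci) + len(ad)
--     predict_label = [0]*length
--     for i in range(len(predict_label)):
--         for j in emci:
--             if i == j:
--                 predict_label[i] = 1
--         for k in lmci:
--             if i == k:
--                 predict_label[i] = 2
--         for l in ad:
--             if i == l:
--                 predict_label[i] = 3
--     return predict_label
-- ===== SOURCE B (Python) =====
-- def hierarchical_model(cn, emci, lmci, ad):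
--     length = len(cn) + len(emci) + len(lmci) + len(ad)
--     labels = [0] * length
--     for group, label in ((emci, 1), (lmci, 2), (ad, 3)):
--         for j in group:
--             if 0 <= j < length:
--                 labels[j] = label
--     return labels
-- ===== Notes on version B (the rewrite author's own statement) =====
-- stated objective: faster
-- what changed: Instead of scanning every group for every index (nested loops), B writes the label directly at each group member's index in one pass per group, with a bounds check; later groups override earlier ones exactly as in A.
import Mathlib
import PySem

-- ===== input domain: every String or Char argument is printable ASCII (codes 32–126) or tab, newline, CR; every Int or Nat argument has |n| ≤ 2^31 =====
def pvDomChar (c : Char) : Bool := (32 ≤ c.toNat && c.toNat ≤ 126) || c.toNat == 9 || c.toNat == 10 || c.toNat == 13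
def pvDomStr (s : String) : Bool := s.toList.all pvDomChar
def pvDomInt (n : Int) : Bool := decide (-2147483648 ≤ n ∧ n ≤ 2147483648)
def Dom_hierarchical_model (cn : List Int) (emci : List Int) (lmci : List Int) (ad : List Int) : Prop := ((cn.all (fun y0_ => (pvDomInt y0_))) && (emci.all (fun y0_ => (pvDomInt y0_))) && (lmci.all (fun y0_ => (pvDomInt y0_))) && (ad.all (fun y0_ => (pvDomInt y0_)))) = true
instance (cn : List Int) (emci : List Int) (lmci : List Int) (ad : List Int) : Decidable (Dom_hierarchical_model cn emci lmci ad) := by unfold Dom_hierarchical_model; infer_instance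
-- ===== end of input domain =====

-- B replaces A's per-index scan of every group by one direct write per group member (bounds-checked); asymptotically faster.


-- ===== PORT A =====
-- the body of A's outer loop: the three inner scans, each conditionally writing at index i
def hmStepA (emci lmci ad : List Int) (pl : List Int) (i : Nat) : List Int :=
  let pl := emci.foldl (fun pl j => if (i : Int) = j then pl.set i 1 else pl) pl
  let pl := lmci.foldl (fun pl k => if (i : Int) = k then pl.set i 2 else pl) pl
  ad.foldl (fun pl l => if (i : Int) = l then pl.set i 3 else pl) pl

def hierarchical_model (cn : List Int) (emci : List Int) (lmci : List Int) (ad : List Int) : List Int :=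
  let length := cn.length + emci.length + lmci.length + ad.length
  let predict_label : List Int := List.replicate length 0
  (List.range predict_label.length).foldl (hmStepA emci lmci ad) predict_label

-- ===== PORT B =====
-- one pass over a group: write the label at each in-range member index
def hmAssign (pl : List Int) (grp : List Int) (lab : Int) : List Int :=
  grp.foldl (fun pl j => if 0 ≤ j ∧ j < (pl.length : Int) then pl.set j.toNat lab else pl) pl

def hierarchical_model_alt (cn : List Int) (emci : List Int) (lmci : List Int) (ad : List Int) : List Int :=
  let length := cn.length + emci.length + lmci.length + ad.length
  let labels : List Int := List.replicate length 0
  [(emci, (1 : Int)), (lmci, 2), (ad, 3)].foldl (fun pl g => hmAssign pl g.1 g.2) labels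

-- ===== PRECONDITION & SPEC =====
def Spec_hierarchical_model (cn : List Int) (emci : List Int) (lmci : List Int) (ad : List Int) (out : List Int) : Prop := out = hierarchical_model_alt cn emci lmci ad
instance (cn : List Int) (emci : List Int) (lmci : List Int) (ad : List Int) (out : List Int) : Decidable (Spec_hierarchical_model cn emci lmci ad out) := by unfold Spec_hierarchical_model; infer_instance

-- ===== CLAIM (what is proved, stated in full; the proofs are below) =====
def Claim_equal_hierarchical_model : Prop := ∀ (cn : List Int) (emci : List Int) (lmci : List Int) (ad : List Int), Dom_hierarchical_model cn emci lmci ad → Spec_hierarchical_model cn emci lmci ad (hierarchical_model cn emci lmci ad)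

-- ===== LEMMAS AND PROOFS =====

-- the label index i ends with: last matching group wins (ad over lmci over emci), else 0
def hmClassify (emci lmci ad : List Int) (i : Nat) : Int :=
  if (i : Int) ∈ ad then 3 else if (i : Int) ∈ lmci then 2 else if (i : Int) ∈ emci then 1 else 0

theorem foldl_cond_set (i : Nat) (v : Int) (js : List Int) (pl : List Int) :
    js.foldl (fun pl j => if (i : Int) = j then pl.set i v else pl) pl
      = if (i : Int) ∈ js then pl.set i v else pl := by
  induction js generalizing pl with
  | nil => simp
  | cons j js ih =>
    simp only [List.foldl_cons, List.mem_cons]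
    by_cases h : (i : Int) = j
    · subst h; simp [ih, List.set_set]
    · simp [h, ih]

theorem hmStepA_length (emci lmci ad : List Int) (pl : List Int) (i : Nat) :
    (hmStepA emci lmci ad pl i).length = pl.length := by
  simp only [hmStepA, foldl_cond_set]
  split_ifs <;> simp

theorem hmStepA_getElem? (emci lmci ad : List Int) (pl : List Int) (i k : Nat) :
    (hmStepA emci lmci ad pl i)[k]? =
      if k = i ∧ k < pl.length ∧ ((k : Int) ∈ emci ∨ (k : Int) ∈ lmci ∨ (k : Int) ∈ ad) then
        some (hmClassify emci lmci ad k)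
      else pl[k]? := by
  simp only [hmStepA, foldl_cond_set, hmClassify]
  by_cases hk : k = i
  · subst hk
    by_cases hlen : k < pl.length
    · split_ifs <;> simp_all
    · have h1 : ∀ (l : List Int) (v : Int), l.length = pl.length → l.set k v = l := by
        intro l v hl
        exact List.set_eq_of_length_le (by omega)
      split_ifs <;> simp_all
  · split_ifs <;> simp_all [Ne.symm hk]

theorem foldl_stepA_getElem? (emci lmci ad : List Int) (is : List Nat) (pl : List Int) (k : Nat) :
    (is.foldl (hmStepA emci lmci ad) pl)[k]? =
      if k ∈ is ∧ k < pl.length ∧ ((k : Int) ∈ emci ∨ (k : Int) ∈ lmci ∨ (k : Int) ∈ ad) then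
        some (hmClassify emci lmci ad k)
      else pl[k]? := by
  induction is generalizing pl with
  | nil => simp
  | cons i is ih =>
    simp only [List.foldl_cons, ih, hmStepA_length, List.mem_cons]
    rw [hmStepA_getElem?]
    split_ifs <;> tauto

theorem hmAssign_length (pl grp : List Int) (lab : Int) :
    (hmAssign pl grp lab).length = pl.length := by
  induction grp generalizing pl with
  | nil => rfl
  | cons j js ih =>
    simp only [hmAssign, List.foldl_cons] at *
    split_ifs <;> simp [ih]

theorem hmAssign_getElem? (grp : List Int) (pl : List Int) (lab : Int) (k : Nat) :
    (hmAssign pl grp lab)[k]? =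
      if (k : Int) ∈ grp ∧ k < pl.length then some lab else pl[k]? := by
  induction grp generalizing pl with
  | nil => simp [hmAssign]
  | cons j js ih =>
    simp only [hmAssign, List.foldl_cons] at *
    by_cases hj : 0 ≤ j ∧ j < (pl.length : Int)
    · rw [if_pos hj, ih]
      by_cases hkj : (k : Int) = j
      · have hk : j.toNat = k := by omega
        subst hk
        have hlt : j.toNat < pl.length := by omega
        simp [hlt, List.mem_cons, hkj]
      · have hne : j.toNat ≠ k := by omega
        simp [hne, List.mem_cons, hkj]
    · rw [if_neg hj, ih]
      by_cases hkj : (k : Int) = j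
      · have hnl : ¬ k < pl.length := by omega
        simp [hnl]
      · simp [List.mem_cons, hkj]

theorem hm_getElem?_eq (cn emci lmci ad : List Int) (k : Nat) :
    (hierarchical_model cn emci lmci ad)[k]? = (hierarchical_model_alt cn emci lmci ad)[k]? := by
  simp only [hierarchical_model, hierarchical_model_alt, List.foldl_cons, List.foldl_nil,
    List.length_replicate]
  rw [foldl_stepA_getElem?]
  rw [hmAssign_getElem?, hmAssign_getElem?, hmAssign_getElem?,
    hmAssign_length, hmAssign_length, List.length_replicate]
  simp only [List.mem_range, List.getElem?_replicate, hmClassify]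
  split_ifs <;> simp_all

-- ===== VERDICT (by name: the statement is the Claim_ definition above) =====
theorem hierarchical_model_spec : Claim_equal_hierarchical_model := by
  intro cn emci lmci ad _
  unfold Spec_hierarchical_model
  exact List.ext_getElem? (hm_getElem?_eq cn emci lmci ad)
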